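-- pv_equiv track=rewrite | github.com/bvedang/OSIRIS-POC | poc_v1/pre-poc_osiris.py | parse_security_review
-- ===== SOURCE A (Python) =====
-- from typing import List, Dict, Set, Tuple, Optional, Any
--
-- def parse_security_review(review_text: str) -> Dict[str, Any]:
--     """Parse security review into structured format"""
--     issues = []
--     current_issue = {}
--
--     for line in review_text.split('\n'):
--         if line.startswith('- Severity:'):
--             if current_issue:
--                 issues.append(current_issue)
--             current_issue = {'severity': line[11:].strip()}
--         elif line.startswith('- Issue:'):
--             current_issue['description'] = line[8:].strip()
--         elif line.startswith('- Impact:'):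
--             current_issue['impact'] = line[9:].strip()
--         elif line.startswith('- Fix:'):
--             current_issue['fix'] = line[6:].strip()
--
--     if current_issue:
--         issues.append(current_issue)
--
--     return {'security_issues': issues}
-- ===== SOURCE B (Python) =====
-- def parse_security_review(review_text: str):
--     """Parse security review into structured format (group-then-convert)."""
--     # Pass 1: partition the lines into groups, a new group at every '- Severity:' line.
--     groups = []
--     current = []
--     for line in review_text.split('\n'):
--         if line.startswith('- Severity:'):
--             groups.append(current)
--             current = [line]
--         else:
--             current.append(line)
--     groups.append(current)
--     # Pass 2: convert each group to a dict; keep only non-empty dicts.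
--     prefixes = (('- Severity:', 'severity'), ('- Issue:', 'description'),
--                 ('- Impact:', 'impact'), ('- Fix:', 'fix'))
--     issues = []
--     for group in groups:
--         issue = {}
--         for line in group:
--             for prefix, key in prefixes:
--                 if line.startswith(prefix):
--                     issue[key] = line[len(prefix):].strip()
--                     break
--         if issue:
--             issues.append(issue)
--     return {'security_issues': issues}
-- ===== Notes on version B (the rewrite author's own statement) =====
-- stated objective: alternative
-- what changed: Replaces A's single stateful line loop (flushing a mutable current dict at each severity line) by two separate passes: first partition the lines into groups split at '- Severity:' lines, then convert each group into a dict via one prefix table and keep the non-empty ones.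
import Mathlib
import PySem

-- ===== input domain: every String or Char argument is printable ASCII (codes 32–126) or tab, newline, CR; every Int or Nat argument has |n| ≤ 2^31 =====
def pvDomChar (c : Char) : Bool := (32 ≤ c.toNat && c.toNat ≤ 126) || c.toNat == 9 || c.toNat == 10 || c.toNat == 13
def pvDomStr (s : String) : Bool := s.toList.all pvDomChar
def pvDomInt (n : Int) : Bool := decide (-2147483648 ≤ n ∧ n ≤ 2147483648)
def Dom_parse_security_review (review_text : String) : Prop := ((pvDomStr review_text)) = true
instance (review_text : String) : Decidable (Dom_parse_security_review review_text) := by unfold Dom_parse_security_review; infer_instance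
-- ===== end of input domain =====

-- B differs from A by decomposition only (two passes instead of one stateful loop); same cost.

-- ===== PORT A =====
-- A's loop body: the if/elif chain over one line, state = (issues so far, current_issue)
def pvStepA (st : List (PySem.Dict String String) × PySem.Dict String String) (line : String) :
    List (PySem.Dict String String) × PySem.Dict String String :=
  if PySem.Str.startswith line "- Severity:" then
    ((if st.2.items.isEmpty then st.1 else st.1 ++ [st.2]),
     PySem.Dict.empty.insert "severity" (PySem.Str.strip (PySem.Str.slice line (some 11) none)))
  else if PySem.Str.startswith line "- Issue:" then
    (st.1, st.2.insert "description" (PySem.Str.strip (PySem.Str.slice line (some 8) none)))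
  else if PySem.Str.startswith line "- Impact:" then
    (st.1, st.2.insert "impact" (PySem.Str.strip (PySem.Str.slice line (some 9) none)))
  else if PySem.Str.startswith line "- Fix:" then
    (st.1, st.2.insert "fix" (PySem.Str.strip (PySem.Str.slice line (some 6) none)))
  else st

def parse_security_review (review_text : String) : List (String × List (List (String × String))) :=
  let st := ((PySem.Str.split? review_text "\n").getD []).foldl pvStepA ([], PySem.Dict.empty)
  let issues := if st.2.items.isEmpty then st.1 else st.1 ++ [st.2]
  [("security_issues", issues.map (fun d => d.items))]

-- ===== PORT B =====
-- B pass 1 loop body: partition lines into groups, a new group at each '- Severity:' line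
def pvStepG (st : List (List String) × List String) (line : String) :
    List (List String) × List String :=
  if PySem.Str.startswith line "- Severity:" then (st.1 ++ [st.2], [line])
  else (st.1, st.2 ++ [line])

-- B's prefix table, (prefix, key, cut offset)
def pvPrefixes : List (String × String × Int) :=
  [("- Severity:", "severity", 11), ("- Issue:", "description", 8),
   ("- Impact:", "impact", 9), ("- Fix:", "fix", 6)]

-- B inner loop: first matching prefix of the table updates the dict ('break')
def pvLineKV (d : PySem.Dict String String) (line : String) : PySem.Dict String String :=
  match pvPrefixes.find? (fun p => PySem.Str.startswith line p.1) with
  | some p => d.insert p.2.1 (PySem.Str.strip (PySem.Str.slice line (some p.2.2) none))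
  | none => d

-- B pass 2: a group to a dict
def pvConvert (g : List String) : PySem.Dict String String :=
  g.foldl pvLineKV PySem.Dict.empty

def parse_security_review_alt (review_text : String) : List (String × List (List (String × String))) :=
  let st := ((PySem.Str.split? review_text "\n").getD []).foldl pvStepG ([], [])
  let groups := st.1 ++ [st.2]
  let issues := groups.foldl
    (fun acc g => let d := pvConvert g; if d.items.isEmpty then acc else acc ++ [d]) []
  [("security_issues", issues.map (fun d => d.items))]

-- ===== PRECONDITION & SPEC =====
def Spec_parse_security_review (review_text : String) (out : List (String × List (List (String × String)))) : Prop := out = parse_security_review_alt review_text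
instance (review_text : String) (out : List (String × List (List (String × String)))) : Decidable (Spec_parse_security_review review_text out) := by unfold Spec_parse_security_review; infer_instance

-- ===== CLAIM (what is proved, stated in full; the proofs are below) =====
def Claim_equal_parse_security_review : Prop := ∀ (review_text : String), Dom_parse_security_review review_text → Spec_parse_security_review review_text (parse_security_review review_text)

-- ===== LEMMAS AND PROOFS =====

-- recursive characterisation of B's grouping pass
def pvGrps : List String → List String → List (List String)
  | [], cur => [cur]
  | l :: ls, cur =>
    if PySem.Str.startswith l "- Severity:" then cur :: pvGrps ls [l]
    else pvGrps ls (cur ++ [l])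

theorem pvGroups_eq (lines : List String) : ∀ (groups : List (List String)) (cur : List String),
    (lines.foldl pvStepG (groups, cur)).1 ++ [(lines.foldl pvStepG (groups, cur)).2]
      = groups ++ pvGrps lines cur := by
  induction lines with
  | nil => intro groups cur; simp [pvGrps]
  | cons l ls ih =>
    intro groups cur
    by_cases h : PySem.Str.startswith l "- Severity:" = true
    · simp only [List.foldl_cons, pvStepG, pvGrps]
      rw [if_pos h, if_pos h, ih]
      simp
    · simp only [List.foldl_cons, pvStepG, pvGrps]
      rw [if_neg h, if_neg h]
      exact ih _ _

theorem pvConvert_append (g : List String) (l : String) :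
    pvConvert (g ++ [l]) = pvLineKV (pvConvert g) l := by
  simp [pvConvert]

theorem pvStepA_not_sev (st : List (PySem.Dict String String) × PySem.Dict String String)
    (l : String) (h : ¬ PySem.Str.startswith l "- Severity:" = true) :
    pvStepA st l = (st.1, pvLineKV st.2 l) := by
  simp only [pvStepA, pvLineKV, pvPrefixes]
  rw [if_neg h, List.find?_cons_of_neg (by exact h)]
  by_cases h2 : PySem.Str.startswith l "- Issue:" = true
  · rw [if_pos h2, List.find?_cons_of_pos (by exact h2)]
  · rw [if_neg h2, List.find?_cons_of_neg (by exact h2)]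
    by_cases h3 : PySem.Str.startswith l "- Impact:" = true
    · rw [if_pos h3, List.find?_cons_of_pos (by exact h3)]
    · rw [if_neg h3, List.find?_cons_of_neg (by exact h3)]
      by_cases h4 : PySem.Str.startswith l "- Fix:" = true
      · rw [if_pos h4, List.find?_cons_of_pos (by exact h4)]
      · rw [if_neg h4, List.find?_cons_of_neg (by exact h4)]
        simp [List.find?_nil]

theorem pvLineKV_sev (l : String) (h : PySem.Str.startswith l "- Severity:" = true) :
    pvLineKV PySem.Dict.empty l
      = PySem.Dict.empty.insert "severity" (PySem.Str.strip (PySem.Str.slice l (some 11) none)) := by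
  simp only [pvLineKV, pvPrefixes]
  rw [List.find?_cons_of_pos (by exact h)]

theorem pvMain (lines : List String) : ∀ (issues : List (PySem.Dict String String)) (cur : List String),
    (if (lines.foldl pvStepA (issues, pvConvert cur)).2.items.isEmpty
       then (lines.foldl pvStepA (issues, pvConvert cur)).1
       else (lines.foldl pvStepA (issues, pvConvert cur)).1
              ++ [(lines.foldl pvStepA (issues, pvConvert cur)).2])
      = (pvGrps lines cur).foldl
          (fun acc g => let d := pvConvert g; if d.items.isEmpty then acc else acc ++ [d]) issues := by
  induction lines with
  | nil =>
    intro issues cur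
    simp only [List.foldl_nil, pvGrps, List.foldl_cons]
  | cons l ls ih =>
    intro issues cur
    by_cases h : PySem.Str.startswith l "- Severity:" = true
    · have hstep : pvStepA (issues, pvConvert cur) l
          = ((if (pvConvert cur).items.isEmpty then issues else issues ++ [pvConvert cur]),
             pvConvert [l]) := by
        simp only [pvStepA, pvConvert, List.foldl_cons, List.foldl_nil]
        rw [if_pos h, pvLineKV_sev l h]
      rw [List.foldl_cons, hstep, pvGrps]
      rw [if_pos h, List.foldl_cons]
      exact ih _ _
    · have hstep : pvStepA (issues, pvConvert cur) l = (issues, pvConvert (cur ++ [l])) := by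
        rw [pvStepA_not_sev _ _ h, pvConvert_append]
      rw [List.foldl_cons, hstep, pvGrps]
      rw [if_neg h]
      exact ih _ _

-- ===== VERDICT (by name: the statement is the Claim_ definition above) =====
theorem parse_security_review_spec : Claim_equal_parse_security_review := by
  intro review_text _
  unfold Spec_parse_security_review
  simp only [parse_security_review, parse_security_review_alt]
  rw [pvGroups_eq ((PySem.Str.split? review_text "\n").getD []) [] []]
  have h : (if ((((PySem.Str.split? review_text "\n").getD []).foldl pvStepA
                  ([], PySem.Dict.empty)).2.items.isEmpty)
             then (((PySem.Str.split? review_text "\n").getD []).foldl pvStepA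
                  ([], PySem.Dict.empty)).1
             else (((PySem.Str.split? review_text "\n").getD []).foldl pvStepA
                  ([], PySem.Dict.empty)).1
                  ++ [(((PySem.Str.split? review_text "\n").getD []).foldl pvStepA
                  ([], PySem.Dict.empty)).2])
        = (pvGrps ((PySem.Str.split? review_text "\n").getD []) []).foldl
            (fun acc g => let d := pvConvert g; if d.items.isEmpty then acc else acc ++ [d]) [] :=
    pvMain ((PySem.Str.split? review_text "\n").getD []) [] []
  rw [h]
  simp
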